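-- pv_equiv track=rewrite | github.com/KULeuven-MICAS/snax-mlir | compiler/transforms/add_tiling_sequence.py | reduce_order_sizes
-- ===== SOURCE A (Python) =====
-- def reduce_order_sizes(order_sizes: list[tuple[str, int]]) -> list[tuple[str, int]]:
--     """
--     Reduces the order sizes by combining consecutive tuples with the same string value.
--     """
--     if order_sizes == []:
--         return []
--     reduced_order_sizes = []
--     reduced_order_sizes.append(order_sizes[0])
--     for i in range(1, len(order_sizes)):
--         # If the current string is the same as the previous, multiply their size
--         if reduced_order_sizes[-1][0] == order_sizes[i][0]:
--             reduced_order_sizes[-1] = (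
--                 reduced_order_sizes[-1][0],
--                 reduced_order_sizes[-1][1] * order_sizes[i][1],
--             )
--         # If the current string is different from the previous, add it to the list
--         else:
--             reduced_order_sizes.append(order_sizes[i])
--     return reduced_order_sizes
-- ===== SOURCE B (Python) =====
-- def reduce_order_sizes(order_sizes: list[tuple[str, int]]) -> list[tuple[str, int]]:
--     """
--     Divide and conquer: reduce each half recursively, then merge the two reduced
--     halves, combining the boundary tuples if their string values match.
--     """
--     if len(order_sizes) <= 1:
--         return list(order_sizes)
--     mid = len(order_sizes) // 2
--     left = reduce_order_sizes(order_sizes[:mid])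
--     right = reduce_order_sizes(order_sizes[mid:])
--     if left[-1][0] == right[0][0]:
--         return left[:-1] + [(left[-1][0], left[-1][1] * right[0][1])] + right[1:]
--     return left + right
-- ===== Notes on version B (the rewrite author's own statement) =====
-- stated objective: alternative
-- what changed: B replaces A's single left-to-right pass with an accumulator by a divide-and-conquer recursion: split the list in half, reduce each half independently, and merge the two reduced halves by combining the boundary tuples when their keys match (correct because run-merging is associative).
import Mathlib
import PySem

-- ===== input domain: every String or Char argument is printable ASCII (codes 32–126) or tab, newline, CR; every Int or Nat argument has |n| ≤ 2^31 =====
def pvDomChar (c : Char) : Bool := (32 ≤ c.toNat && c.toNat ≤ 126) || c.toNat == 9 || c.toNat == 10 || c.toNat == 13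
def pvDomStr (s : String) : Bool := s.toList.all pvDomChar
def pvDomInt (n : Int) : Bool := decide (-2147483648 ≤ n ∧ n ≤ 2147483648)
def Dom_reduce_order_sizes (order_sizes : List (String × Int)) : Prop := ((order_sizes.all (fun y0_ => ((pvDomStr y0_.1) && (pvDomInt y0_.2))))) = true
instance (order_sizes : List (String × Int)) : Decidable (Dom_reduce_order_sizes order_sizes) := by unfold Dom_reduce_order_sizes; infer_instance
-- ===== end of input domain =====

-- B replaces A's single accumulator pass with a divide-and-conquer recursion
-- (reduce each half, merge at the boundary); same result, different structure.

-- ===== PORT A =====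
-- one loop step of A: compare the current tuple with the last element of the result,
-- either fold it in (multiply sizes) or append it
def pvStepA (acc : List (String × Int)) (x : String × Int) : List (String × Int) :=
  match acc.getLast? with
  | some last =>
      if last.1 == x.1 then acc.dropLast ++ [(last.1, last.2 * x.2)]
      else acc ++ [x]
  | none => acc ++ [x]   -- unreachable: A's accumulator is never empty

def reduce_order_sizes (order_sizes : List (String × Int)) : List (String × Int) :=
  match order_sizes with
  | [] => []
  | x :: rest => rest.foldl pvStepA [x]

-- ===== PORT B =====
-- merge step of Source B: combine left[-1] and right[0] if their keys match.
-- Both arguments are nonempty wherever Source B performs this step, so the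
-- fallback arms of the match are unreachable there.
def pvMerge (L R : List (String × Int)) : List (String × Int) :=
  match L.getLast?, R.head? with
  | some a, some b =>
      if a.1 == b.1 then L.dropLast ++ (a.1, a.2 * b.2) :: R.tail
      else L ++ R
  | _, _ => L ++ R

def reduce_order_sizes_alt (order_sizes : List (String × Int)) : List (String × Int) :=
  if _h : order_sizes.length ≤ 1 then order_sizes
  else
    pvMerge (reduce_order_sizes_alt (order_sizes.take (order_sizes.length / 2)))
            (reduce_order_sizes_alt (order_sizes.drop (order_sizes.length / 2)))
termination_by order_sizes.length
decreasing_by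
  · simp only [List.length_take]; omega
  · simp only [List.length_drop]; omega

-- ===== PRECONDITION & SPEC =====
def Spec_reduce_order_sizes (order_sizes : List (String × Int)) (out : List (String × Int)) : Prop := out = reduce_order_sizes_alt order_sizes
instance (order_sizes : List (String × Int)) (out : List (String × Int)) : Decidable (Spec_reduce_order_sizes order_sizes out) := by unfold Spec_reduce_order_sizes; infer_instance

-- ===== CLAIM (what is proved, stated in full; the proofs are below) =====
def Claim_equal_reduce_order_sizes : Prop := ∀ (order_sizes : List (String × Int)), Dom_reduce_order_sizes order_sizes → Spec_reduce_order_sizes order_sizes (reduce_order_sizes order_sizes)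

-- ===== LEMMAS AND PROOFS =====

-- proof-side intermediate: run-based reduction (consume each maximal run of equal
-- consecutive keys, multiplying sizes); both ports are proved equal to it.
def pvTakeRun (k : String) (acc : Int) : List (String × Int) → Int × List (String × Int)
  | [] => (acc, [])
  | (k', v) :: rest =>
      if k' == k then pvTakeRun k (acc * v) rest else (acc, (k', v) :: rest)

theorem pvTakeRun_len (k : String) : ∀ (xs : List (String × Int)) (acc : Int),
    (pvTakeRun k acc xs).2.length ≤ xs.length := by
  intro xs
  induction xs with
  | nil => intro acc; simp [pvTakeRun]
  | cons x rest ih =>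
      intro acc
      obtain ⟨k', v⟩ := x
      by_cases h : k' == k <;> simp [pvTakeRun, h]
      exact Nat.le_succ_of_le (ih _)

def pvRunReduce (xs : List (String × Int)) : List (String × Int) :=
  match xs with
  | [] => []
  | (k, v) :: rest =>
      let pr := pvTakeRun k 1 ((k, v) :: rest)
      (k, pr.1) :: pvRunReduce pr.2
termination_by xs.length
decreasing_by
  simp only [pvTakeRun, beq_self_eq_true, if_true, List.length_cons]
  exact Nat.lt_succ_of_le (pvTakeRun_len k rest (1 * v))

theorem pvStepA_singleton (k : String) (s : Int) (x : String × Int) :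
    pvStepA [(k, s)] x = if k == x.1 then [(k, s * x.2)] else [(k, s), x] := rfl

theorem runReduce_nil : pvRunReduce [] = [] := by
  rw [pvRunReduce]

theorem runReduce_cons (k : String) (v : Int) (rest : List (String × Int)) :
    pvRunReduce ((k, v) :: rest)
      = (k, (pvTakeRun k v rest).1) :: pvRunReduce (pvTakeRun k v rest).2 := by
  rw [pvRunReduce]
  simp [pvTakeRun, one_mul]

theorem runReduce_ne_nil (xs : List (String × Int)) (h : xs ≠ []) : pvRunReduce xs ≠ [] := by
  match xs with
  | (k, v) :: rest => rw [runReduce_cons]; simp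

theorem pvStepA_ne_nil (l : List (String × Int)) (x : String × Int) : pvStepA l x ≠ [] := by
  unfold pvStepA
  cases h : l.getLast? <;> simp
  split <;> simp

theorem pvStepA_append (acc l : List (String × Int)) (x : String × Int) (hl : l ≠ []) :
    pvStepA (acc ++ l) x = acc ++ pvStepA l x := by
  obtain ⟨l', a, rfl⟩ := (List.eq_nil_or_concat l).resolve_left hl
  simp only [List.concat_eq_append, ← List.append_assoc]
  unfold pvStepA
  rw [List.getLast?_concat, List.getLast?_concat, List.dropLast_concat, List.dropLast_concat]
  split <;> simp [List.append_assoc] <;> split_ifs <;> simp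

theorem pvFoldl_stepA_append (xs : List (String × Int)) :
    ∀ (acc l : List (String × Int)), l ≠ [] →
    List.foldl pvStepA (acc ++ l) xs = acc ++ List.foldl pvStepA l xs := by
  induction xs with
  | nil => intro acc l _; simp
  | cons x rest ih =>
      intro acc l hl
      simp only [List.foldl_cons]
      rw [pvStepA_append acc l x hl, ih acc _ (pvStepA_ne_nil l x)]

theorem pvMainLemma (xs : List (String × Int)) : ∀ (k : String) (s : Int),
    List.foldl pvStepA [(k, s)] xs
      = (k, (pvTakeRun k s xs).1) :: pvRunReduce (pvTakeRun k s xs).2 := by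
  induction xs with
  | nil => intro k s; simp [pvTakeRun, runReduce_nil]
  | cons x rest ih =>
      intro k s
      obtain ⟨k', v⟩ := x
      by_cases h : k' = k
      · have hb : (k == k') = true := by simp [h]
        have hb' : (k' == k) = true := by simp [h]
        simp only [List.foldl_cons, pvStepA_singleton, pvTakeRun, hb, hb', if_true]
        exact ih k (s * v)
      · have hb : (k == k') = false := by simp [Ne.symm h]
        have hb' : (k' == k) = false := by simp [h]
        simp only [List.foldl_cons, pvStepA_singleton, pvTakeRun, hb, hb',
          Bool.false_eq_true, if_false]
        have h2 : List.foldl pvStepA [(k, s), (k', v)] rest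
            = [(k, s)] ++ List.foldl pvStepA [(k', v)] rest :=
          pvFoldl_stepA_append rest [(k, s)] [(k', v)] (by simp)
        rw [h2, ih k' v, runReduce_cons]
        simp

theorem A_eq_runReduce (xs : List (String × Int)) :
    reduce_order_sizes xs = pvRunReduce xs := by
  match xs with
  | [] => simp [reduce_order_sizes, runReduce_nil]
  | (k, v) :: rest =>
      show List.foldl pvStepA [(k, v)] rest = pvRunReduce ((k, v) :: rest)
      rw [pvMainLemma rest k v, runReduce_cons]

-- the accumulator of pvTakeRun only scales the product; the remainder is independent
theorem pvTakeRun_scale (k : String) : ∀ (l : List (String × Int)) (a b : Int),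
    pvTakeRun k (a * b) l = (a * (pvTakeRun k b l).1, (pvTakeRun k b l).2) := by
  intro l
  induction l with
  | nil => intro a b; simp [pvTakeRun]
  | cons x rest ih =>
      intro a b
      obtain ⟨k', v⟩ := x
      by_cases h : k' == k <;> simp only [pvTakeRun, h, if_true, Bool.false_eq_true, if_false]
      rw [mul_assoc, ih]

theorem pvTakeRun_append (k : String) (ys : List (String × Int)) :
    ∀ (rest : List (String × Int)) (a : Int),
    pvTakeRun k a (rest ++ ys)
      = if (pvTakeRun k a rest).2 = [] then pvTakeRun k (pvTakeRun k a rest).1 ys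
        else ((pvTakeRun k a rest).1, (pvTakeRun k a rest).2 ++ ys) := by
  intro rest
  induction rest with
  | nil => intro a; simp [pvTakeRun]
  | cons x r ih =>
      intro a
      obtain ⟨k', v⟩ := x
      by_cases h : k' == k <;>
        simp only [List.cons_append, pvTakeRun, h, if_true, Bool.false_eq_true, if_false]
      · exact ih (a * v)
      · simp

theorem pvMerge_cons (x : String × Int) (M R : List (String × Int)) (hM : M ≠ []) :
    pvMerge (x :: M) R = x :: pvMerge M R := by
  obtain ⟨M', a, rfl⟩ := (List.eq_nil_or_concat M).resolve_left hM
  unfold pvMerge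
  simp only [List.concat_eq_append, ← List.cons_append]
  rw [List.getLast?_concat, List.getLast?_concat, List.dropLast_concat, List.dropLast_concat]
  cases R.head? with
  | none => simp
  | some b => dsimp only; split_ifs <;> simp

theorem runReduce_merge : ∀ (n : ℕ) (xs ys : List (String × Int)),
    xs.length ≤ n → xs ≠ [] → ys ≠ [] →
    pvRunReduce (xs ++ ys) = pvMerge (pvRunReduce xs) (pvRunReduce ys) := by
  intro n
  induction n with
  | zero => intro xs ys hlen hxs _; exact absurd (List.length_eq_zero_iff.mp (Nat.le_zero.mp hlen)) hxs
  | succ n ih =>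
      intro xs ys hlen hxs hys
      match xs with
      | (k, v) :: rest =>
        rw [List.cons_append, runReduce_cons, runReduce_cons,
          pvTakeRun_append k ys rest v]
        by_cases hr : (pvTakeRun k v rest).2 = []
        · -- the first run swallows all of rest; it may continue into ys
          rw [if_pos hr]
          set p := (pvTakeRun k v rest).1 with hp
          match ys with
          | (k2, w) :: ys' =>
            by_cases hk : k2 = k
            · subst hk
              rw [runReduce_cons]
              simp only [pvTakeRun, beq_self_eq_true, if_true]
              rw [pvTakeRun_scale k2 ys' p w, hr, runReduce_nil]
              unfold pvMerge
              simp
            · have hb : (k2 == k) = false := by simp [hk]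
              simp only [pvTakeRun, hb, Bool.false_eq_true, if_false]
              rw [hr, runReduce_nil, runReduce_cons]
              unfold pvMerge
              have hkk : (k == k2) = false := by simp [Ne.symm hk]
              simp [hkk]
        · -- the first run ends inside rest; recurse on the remainder
          rw [if_neg hr]
          have hlt : (pvTakeRun k v rest).2.length ≤ n := by
            have := pvTakeRun_len k rest v
            simp only [List.length_cons] at hlen
            omega
          rw [ih (pvTakeRun k v rest).2 ys hlt hr hys,
            pvMerge_cons _ _ _ (runReduce_ne_nil _ hr)]

theorem B_eq_runReduce : ∀ (n : ℕ) (xs : List (String × Int)), xs.length ≤ n →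
    reduce_order_sizes_alt xs = pvRunReduce xs := by
  intro n
  induction n with
  | zero =>
      intro xs hlen
      rw [List.length_eq_zero_iff.mp (Nat.le_zero.mp hlen)]
      rw [reduce_order_sizes_alt]
      simp [runReduce_nil]
  | succ n ih =>
      intro xs hlen
      rw [reduce_order_sizes_alt]
      by_cases h : xs.length ≤ 1
      · rw [dif_pos h]
        match xs with
        | [] => simp [runReduce_nil]
        | [(k, v)] => rw [runReduce_cons]; simp [pvTakeRun, runReduce_nil]
        | x :: y :: r => simp at h
      · rw [dif_neg h]
        have h2 : 2 ≤ xs.length := by omega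
        have ht : (xs.take (xs.length / 2)).length ≤ n := by
          simp only [List.length_take]; omega
        have hd : (xs.drop (xs.length / 2)).length ≤ n := by
          simp only [List.length_drop]; omega
        rw [ih _ ht, ih _ hd,
          ← runReduce_merge (xs.take (xs.length / 2)).length _ _ le_rfl
            (by rw [← List.length_pos_iff]; simp only [List.length_take]; omega)
            (by rw [← List.length_pos_iff]; simp only [List.length_drop]; omega),
          List.take_append_drop]

-- ===== VERDICT (by name: the statement is the Claim_ definition above) =====
theorem reduce_order_sizes_spec : Claim_equal_reduce_order_sizes := by
  intro xs _
  unfold Spec_reduce_order_sizes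
  rw [A_eq_runReduce, B_eq_runReduce xs.length xs le_rfl]
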